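-- pv_equiv track=rewrite | github.com/ahr9n/electrical-network-analyzer | equations.py | get_matrix_a_link
-- ===== SOURCE A (Python) =====
-- def get_branches_order(tree_branches, reversed_branch_name):
--     branches_order = tree_branches.copy()
--     tree_branches.sort()
--     for key, value in reversed_branch_name.items():
--         if key not in tree_branches:
--             branches_order.append(key)
--     return branches_order
--
-- def get_matrix_a(tree_branches, reversed_branch_name, nodes, branches):
--     branches_order = get_branches_order(tree_branches, reversed_branch_name)
--     matrix_a = [[0 for _ in range(branches)] for __ in range(nodes)]
--     for branch in range(branches):
--         (key, value) = reversed_branch_name[branches_order[branch]]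
--         matrix_a[key][branch], matrix_a[value][branch] = 1, -1
--     return matrix_a
--
-- def get_matrix_a_link(tree_branches, reversed_branch_name, nodes, branches):
--     matrix_a = get_matrix_a(tree_branches, reversed_branch_name, nodes, branches)
--     matrix_a_link = []
--     for i in range(nodes - 1):
--         matrix_a_link.append([])
--         for j in range(len(tree_branches), branches):
--             matrix_a_link[i].append(matrix_a[i][j])
--     return matrix_a_link
-- ===== SOURCE B (Python) =====
-- def get_branches_order(tree_branches, reversed_branch_name):
--     branches_order = tree_branches.copy()
--     tree_branches.sort()
--     for key, value in reversed_branch_name.items():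
--         if key not in tree_branches:
--             branches_order.append(key)
--     return branches_order
--
-- def get_matrix_a_link(tree_branches, reversed_branch_name, nodes, branches):
--     # Build only the (nodes-1) x (branches-start) link block: write each link
--     # branch's two incidence entries straight into its column, never
--     # materialising the full nodes x branches matrix that A builds and slices.
--     branches_order = get_branches_order(tree_branches, reversed_branch_name)
--     start = len(tree_branches)
--     result = [[0] * (branches - start) for _ in range(nodes - 1)]
--     for j in range(start, branches):
--         col = j - start
--         key, value = reversed_branch_name[branches_order[j]]
--         if key <= nodes - 2:
--             result[key][col] = 1
--         if value <= nodes - 2: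
--             result[value][col] = -1
--     return result
-- ===== Notes on version B (the rewrite author's own statement) =====
-- stated objective: simpler
-- what changed: B keeps get_branches_order (including its in-place sort of tree_branches) but never materialises the full nodes x branches incidence matrix: it allocates only the (nodes-1) x (branches-start) link block and writes each link branch's two incidence entries directly into its column, replacing A's build-full-matrix-then-slice pipeline with one direct loop over the link columns.
-- outside the precondition, e.g. on get_matrix_a_link([], {'a': (-1, 0)}, 3, 1): A returns [[-1], [0]], B returns [[-1], [1]]
import Mathlib
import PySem

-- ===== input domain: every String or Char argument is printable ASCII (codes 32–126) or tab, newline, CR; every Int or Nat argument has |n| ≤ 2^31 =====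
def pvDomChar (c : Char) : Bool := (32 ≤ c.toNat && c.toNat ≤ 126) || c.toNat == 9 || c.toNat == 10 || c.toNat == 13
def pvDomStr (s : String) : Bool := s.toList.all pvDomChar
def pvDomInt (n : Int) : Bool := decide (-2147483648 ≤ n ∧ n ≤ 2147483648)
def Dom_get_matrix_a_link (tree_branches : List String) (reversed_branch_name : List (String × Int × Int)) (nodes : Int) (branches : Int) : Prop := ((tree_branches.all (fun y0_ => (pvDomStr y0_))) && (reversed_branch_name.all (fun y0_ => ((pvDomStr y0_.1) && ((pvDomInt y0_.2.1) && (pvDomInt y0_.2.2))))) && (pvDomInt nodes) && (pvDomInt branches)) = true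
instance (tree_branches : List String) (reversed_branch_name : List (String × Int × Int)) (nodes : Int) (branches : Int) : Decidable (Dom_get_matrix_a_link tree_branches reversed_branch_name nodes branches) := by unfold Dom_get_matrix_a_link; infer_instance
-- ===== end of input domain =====

-- B builds only the (nodes-1)×(branches-len(tree_branches)) link block, writing each link
-- branch's two entries straight into its column, instead of A's full-matrix-then-slice
-- pipeline (objective: simpler). B reuses get_branches_order, so it performs the same
-- in-place sort of tree_branches as A.

-- ===== PORT A =====
-- shared primitive: Python's "m[r][c] = v" on a list-of-lists (negative-index wraparound,
-- out-of-range assignment left as identity — exact wherever Python does not raise)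
def pvSetCell (m : List (List Int)) (r c : Int) (v : Int) : List (List Int) :=
  PySem.List.pySetD m r (PySem.List.pySetD (PySem.List.pyGetD m r []) c v)

-- Python's d[k] on the association list (first match)
def pvLookup (d : List (String × Int × Int)) (k : String) : Option (Int × Int) :=
  (d.find? (fun p => p.1 == k)).map (fun p => p.2)

def get_branches_order (tree_branches : List String) (reversed_branch_name : List (String × Int × Int)) : List String :=
  let branches_order := tree_branches
  let tree_branches := PySem.List.sorted tree_branches (fun s => s) false   -- tree_branches.sort()
  reversed_branch_name.foldl
    (fun acc p => if tree_branches.contains p.1 then acc else acc ++ [p.1]) branches_order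

-- loop body of get_matrix_a: (key, value) = d[order[branch]]; m[key][branch], m[value][branch] = 1, -1
def pvWriteA (reversed_branch_name : List (String × Int × Int)) (branches_order : List String)
    (m : List (List Int)) (branch : Int) : List (List Int) :=
  let kv := (pvLookup reversed_branch_name (PySem.List.pyGetD branches_order branch "")).getD (0, 0)
  pvSetCell (pvSetCell m kv.1 branch 1) kv.2 branch (-1)

def get_matrix_a (tree_branches : List String) (reversed_branch_name : List (String × Int × Int)) (nodes : Int) (branches : Int) : List (List Int) :=
  let branches_order := get_branches_order tree_branches reversed_branch_name
  let matrix_a := (PySem.List.pyRange 0 nodes 1).map (fun _ => (PySem.List.pyRange 0 branches 1).map (fun _ => (0 : Int)))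
  (PySem.List.pyRange 0 branches 1).foldl (pvWriteA reversed_branch_name branches_order) matrix_a

def get_matrix_a_link (tree_branches : List String) (reversed_branch_name : List (String × Int × Int)) (nodes : Int) (branches : Int) : List (List Int) :=
  let matrix_a := get_matrix_a tree_branches reversed_branch_name nodes branches
  (PySem.List.pyRange 0 (nodes - 1) 1).foldl
    (fun acc i => acc ++ [(PySem.List.pyRange (tree_branches.length : Int) branches 1).foldl
      (fun row j => row ++ [PySem.List.pyGetD (PySem.List.pyGetD matrix_a i []) j 0]) []]) []

-- ===== PORT B =====
-- the two conditional assignments of B's loop body: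
-- if key <= nodes-2: result[key][col] = 1 ; if value <= nodes-2: result[value][col] = -1
def pvWrite2 (nodes : Int) (m : List (List Int)) (uv : Int × Int) (col : Int) : List (List Int) :=
  let res := if uv.1 ≤ nodes - 2 then pvSetCell m uv.1 col 1 else m
  if uv.2 ≤ nodes - 2 then pvSetCell res uv.2 col (-1) else res

-- B's loop body: col = j - start; (key, value) = d[branches_order[j]]; the two writes
def pvWriteB (reversed_branch_name : List (String × Int × Int)) (branches_order : List String)
    (nodes start : Int) (res : List (List Int)) (j : Int) : List (List Int) :=
  pvWrite2 nodes res
    ((pvLookup reversed_branch_name (PySem.List.pyGetD branches_order j "")).getD (0, 0))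
    (j - start)

def get_matrix_a_link_alt (tree_branches : List String) (reversed_branch_name : List (String × Int × Int)) (nodes : Int) (branches : Int) : List (List Int) :=
  let branches_order := get_branches_order tree_branches reversed_branch_name
  let start : Int := (tree_branches.length : Int)
  let result : List (List Int) := List.replicate (nodes - 1).toNat (List.replicate (branches - start).toNat (0 : Int))
  (PySem.List.pyRange start branches 1).foldl
    (pvWriteB reversed_branch_name branches_order nodes start) result

-- ===== PRECONDITION & SPEC =====
-- the dict entries whose key is not a tree branch, in insertion order (their first
-- (branches - len(tree_branches)) elements are the link columns)
def pvNonTree (tree_branches : List String) (reversed_branch_name : List (String × Int × Int)) : List (String × Int × Int) :=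
  reversed_branch_name.filter (fun p => !tree_branches.contains p.1)

-- Pre_ = the natural domain of the function: dict keys distinct (a Python dict cannot repeat them),
-- every tree branch actually used names a dict entry whose endpoints Python can index with
-- (A raises KeyError/IndexError otherwise), enough branches exist (A raises IndexError otherwise),
-- and the endpoints of every used non-tree (link) branch are genuine node numbers in [0, nodes)
-- — Pre_ excludes inputs where such an endpoint is negative: A then still returns, placing the
-- entry by Python's negative-index wraparound in the full matrix, an accident of A's
-- representation that B (working on the smaller link block) does not reproduce and may even raise on.
-- The first disjunct: with branches <= 0 no branch is processed at all and both programs return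
-- the same empty-row block whatever the other arguments are.
def Pre_get_matrix_a_link (tree_branches : List String) (reversed_branch_name : List (String × Int × Int)) (nodes : Int) (branches : Int) : Prop :=
  branches ≤ 0 ∨
  ((reversed_branch_name.map (fun p => p.1)).Nodup ∧
  (∀ s ∈ tree_branches.take branches.toNat,
      (Option.any (fun uv : Int × Int =>
        decide (-nodes ≤ uv.1 ∧ uv.1 < nodes ∧ -nodes ≤ uv.2 ∧ uv.2 < nodes))
        (pvLookup reversed_branch_name s)) = true) ∧
  (∀ p ∈ (pvNonTree tree_branches reversed_branch_name).take (branches - tree_branches.length).toNat,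
      0 ≤ p.2.1 ∧ p.2.1 < nodes ∧ 0 ≤ p.2.2 ∧ p.2.2 < nodes) ∧
  branches ≤ tree_branches.length + (pvNonTree tree_branches reversed_branch_name).length)

instance (tree_branches : List String) (reversed_branch_name : List (String × Int × Int)) (nodes : Int) (branches : Int) : Decidable (Pre_get_matrix_a_link tree_branches reversed_branch_name nodes branches) := by
  unfold Pre_get_matrix_a_link; infer_instance

def pvWitness_get_matrix_a_link : List String × (List (String × Int × Int)) × Int × Int :=
  (["a"], [("a", (0, 1)), ("b", (1, 0))], 2, 2)

def Spec_get_matrix_a_link (tree_branches : List String) (reversed_branch_name : List (String × Int × Int)) (nodes : Int) (branches : Int) (out : List (List Int)) : Prop := out = get_matrix_a_link_alt tree_branches reversed_branch_name nodes branches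
instance (tree_branches : List String) (reversed_branch_name : List (String × Int × Int)) (nodes : Int) (branches : Int) (out : List (List Int)) : Decidable (Spec_get_matrix_a_link tree_branches reversed_branch_name nodes branches out) := by unfold Spec_get_matrix_a_link; infer_instance

-- ===== CLAIM (what is proved, stated in full; the proofs are below) =====
def Claim_equal_get_matrix_a_link : Prop := ∀ (tree_branches : List String) (reversed_branch_name : List (String × Int × Int)) (nodes : Int) (branches : Int), Dom_get_matrix_a_link tree_branches reversed_branch_name nodes branches → Pre_get_matrix_a_link tree_branches reversed_branch_name nodes branches → Spec_get_matrix_a_link tree_branches reversed_branch_name nodes branches (get_matrix_a_link tree_branches reversed_branch_name nodes branches)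

-- ===== LEMMAS AND PROOFS =====

-- reading entry (i, j) of a list-of-lists the way the ports read it
def pvGetCell (m : List (List Int)) (i j : Int) : Int :=
  PySem.List.pyGetD (PySem.List.pyGetD m i []) j 0

-- the value both programs put at link position (i, c)
def pvE (L : List (String × Int × Int)) (i c : Nat) : Int :=
  match L[c]? with
  | none => 0
  | some p => if (i : Int) = p.2.2 then -1 else if (i : Int) = p.2.1 then 1 else 0

lemma pvPyGet?_of_nonneg {α : Type} (xs : List α) (i : Int) (h : 0 ≤ i) :
    PySem.List.pyGet? xs i = xs[i.toNat]? := by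
  simp only [PySem.List.pyGet?, PySem.List.pyIdx?, if_pos h]
  split_ifs with h2
  · simp
  · exact (List.getElem?_eq_none (by omega)).symm

lemma pvIdx?_lt (n : Nat) (i : Int) (k : Nat) (h : PySem.List.pyIdx? n i = some k) : k < n := by
  unfold PySem.List.pyIdx? at h
  split_ifs at h <;> simp_all <;> omega

lemma pvSetD_cases {α : Type} (xs : List α) (i : Int) (v : α) :
    PySem.List.pySetD xs i v = xs ∨
      ∃ (k : Nat) (hk : k < xs.length), (∀ d : α, PySem.List.pyGetD xs i d = xs[k]'hk) ∧
        PySem.List.pySetD xs i v = xs.set k v := by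
  cases h : PySem.List.pyIdx? xs.length i with
  | none =>
    left
    simp [PySem.List.pySetD, PySem.List.pySet?, h]
  | some k =>
    right
    have hk : k < xs.length := pvIdx?_lt _ _ _ h
    refine ⟨k, hk, ?_, ?_⟩
    · intro d
      simp [PySem.List.pyGetD, PySem.List.pyGet?, h, List.getElem?_eq_getElem hk]
    · simp [PySem.List.pySetD, PySem.List.pySet?, h]

lemma pvGetD_set_ne {α : Type} (xs : List α) (k : Nat) (x : α) (j : Int) (d : α)
    (hj : 0 ≤ j) (hne : j.toNat ≠ k) :
    PySem.List.pyGetD (xs.set k x) j d = PySem.List.pyGetD xs j d := by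
  simp only [PySem.List.pyGetD, pvPyGet?_of_nonneg _ _ hj]
  rw [List.getElem?_set_ne (by omega)]

lemma pvGetD_set_self' {α : Type} (xs : List α) (k : Nat) (x : α) (d : α) (i : Int)
    (hi0 : 0 ≤ i) (hik : i.toNat = k) (hk : k < xs.length) :
    PySem.List.pyGetD (xs.set k x) i d = x := by
  simp only [PySem.List.pyGetD, pvPyGet?_of_nonneg _ _ hi0, hik]
  rw [List.getElem?_set_self hk]
  rfl

lemma pvGetD_elem {α : Type} (xs : List α) (k : Nat) (d : α) (hk : k < xs.length) :
    PySem.List.pyGetD xs (k : Int) d = xs[k]'hk := by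
  rw [PySem.List.pyGetD_natCast, List.getD_eq_getElem?_getD, List.getElem?_eq_getElem hk,
      Option.getD_some]

lemma pvGetCell_set_ne_col (m : List (List Int)) (r c v i j : Int)
    (hi0 : 0 ≤ i) (hc0 : 0 ≤ c) (hj0 : 0 ≤ j) (hne : c ≠ j) :
    pvGetCell (pvSetCell m r c v) i j = pvGetCell m i j := by
  unfold pvGetCell pvSetCell
  rcases pvSetD_cases m r (PySem.List.pySetD (PySem.List.pyGetD m r []) c v) with h | ⟨k, hk, hget, hset⟩
  · rw [h]
  · rw [hset]
    by_cases hik : i.toNat = k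
    · have hri : PySem.List.pyGetD m i [] = m[k]'hk := by
        rw [show i = ((k : Nat) : Int) by omega]
        exact pvGetD_elem m k [] hk
      rw [pvGetD_set_self' _ _ _ _ i hi0 hik hk, hget []]
      rw [PySem.List.pySetD_of_nonneg _ _ hc0]
      rw [pvGetD_set_ne _ _ _ _ _ hj0 (by omega), hri]
    · rw [pvGetD_set_ne _ _ _ _ _ hi0 hik]

lemma pvGetCell_set_ne_row (m : List (List Int)) (r c v i j : Int)
    (hr0 : 0 ≤ r) (hi0 : 0 ≤ i) (hne : r ≠ i) :
    pvGetCell (pvSetCell m r c v) i j = pvGetCell m i j := by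
  unfold pvGetCell pvSetCell
  rw [PySem.List.pySetD_of_nonneg _ _ hr0, pvGetD_set_ne _ _ _ _ _ hi0 (by omega)]

lemma pvGetCell_set_same (m : List (List Int)) (r c v : Int) (B : Nat)
    (hd : ∀ row ∈ m, row.length = B)
    (hr0 : 0 ≤ r) (hrlen : r < (m.length : Int)) (hc0 : 0 ≤ c) (hclen : c < (B : Int)) :
    pvGetCell (pvSetCell m r c v) r c = v := by
  unfold pvGetCell pvSetCell
  have hrk : r.toNat < m.length := by omega
  rw [PySem.List.pySetD_of_nonneg _ _ hr0]
  rw [pvGetD_set_self' _ _ _ _ r hr0 rfl hrk]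
  rw [PySem.List.pySetD_of_nonneg _ _ hc0]
  have hmem : PySem.List.pyGetD m r [] ∈ m := by
    rw [show r = ((r.toNat : Nat) : Int) from (Int.toNat_of_nonneg hr0).symm,
        pvGetD_elem m r.toNat [] hrk]
    exact List.getElem_mem hrk
  exact pvGetD_set_self' _ _ _ _ c hc0 rfl (by rw [hd _ hmem]; omega)

lemma pvSetCell_length (m : List (List Int)) (r c v : Int) :
    (pvSetCell m r c v).length = m.length :=
  PySem.List.length_pySetD _ _ _

lemma pvSetCell_dims (m : List (List Int)) (r c v : Int) (B : Nat)
    (hd : ∀ row ∈ m, row.length = B) :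
    ∀ row ∈ pvSetCell m r c v, row.length = B := by
  unfold pvSetCell
  rcases pvSetD_cases m r (PySem.List.pySetD (PySem.List.pyGetD m r []) c v) with h | ⟨k, hk, hget, hset⟩
  · rw [h]; exact hd
  · rw [hset]
    intro row hrow
    rcases List.mem_or_eq_of_mem_set hrow with h1 | h1
    · exact hd _ h1
    · rw [h1, PySem.List.length_pySetD, hget [], hd _ (List.getElem_mem hk)]

lemma pvGetCell_all_zero (m : List (List Int)) (i j : Int)
    (h : ∀ row ∈ m, ∀ x ∈ row, x = 0) (hi0 : 0 ≤ i) (hj0 : 0 ≤ j) :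
    pvGetCell m i j = 0 := by
  unfold pvGetCell
  simp only [PySem.List.pyGetD, pvPyGet?_of_nonneg _ _ hi0]
  cases hrow : m[i.toNat]? with
  | none => simp [pvPyGet?_of_nonneg _ _ hj0]
  | some row =>
    simp only [Option.getD_some, pvPyGet?_of_nonneg _ _ hj0]
    cases hx : row[j.toNat]? with
    | none => rfl
    | some x =>
      have hxr : x ∈ row := List.mem_of_getElem? hx
      have : x = 0 := h _ (List.mem_of_getElem? hrow) _ hxr
      simp [this]

-- == A side ==

lemma pv_bo_eq (tree_branches : List String) (d : List (String × Int × Int)) :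
    get_branches_order tree_branches d
      = tree_branches ++ (pvNonTree tree_branches d).map (fun p => p.1) := by
  unfold get_branches_order pvNonTree
  have hc : ∀ s : String,
      (PySem.List.sorted tree_branches (fun s => s) false).contains s = tree_branches.contains s := by
    intro s
    rw [Bool.eq_iff_iff]
    simp only [List.contains_iff_mem]
    exact PySem.List.mem_sorted _ _ _ _
  rw [PySem.List.foldl_congr_mem _ _
      (fun acc p => if (!(PySem.List.sorted tree_branches (fun s => s) false).contains p.1) = true
        then acc ++ [p.1] else acc) _
      (by intro acc x _
          by_cases h : x.1 ∈ PySem.List.sorted tree_branches (fun s => s) false <;>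
            simp [h])]
  rw [PySem.List.foldl_append_if]
  congr 1
  congr 1
  exact List.filter_congr (fun x _ => by rw [hc])

lemma pvLookup_of_mem (d : List (String × Int × Int)) (p : String × Int × Int)
    (hk : (d.map (fun q => q.1)).Nodup) (hp : p ∈ d) : pvLookup d p.1 = some p.2 := by
  unfold pvLookup
  induction d with
  | nil => cases hp
  | cons q rest ih =>
    rcases List.mem_cons.1 hp with h | h
    · subst h
      rw [List.find?_cons_of_pos (by simp)]
      rfl
    · by_cases hq : q.1 = p.1
      · exfalso
        have : p.1 ∈ rest.map (fun q => q.1) := List.mem_map_of_mem h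
        rw [List.map_cons, List.nodup_cons] at hk
        exact hk.1 (hq ▸ this)
      · rw [List.find?_cons_of_neg (by simp [hq])]
        rw [List.map_cons, List.nodup_cons] at hk
        exact ih hk.2 h

lemma pv_foldlA_getCell_ne (d : List (String × Int × Int)) (bo : List String)
    (l : List Int) (m : List (List Int)) (i j : Int) (hi0 : 0 ≤ i) (hj0 : 0 ≤ j)
    (h : ∀ x ∈ l, 0 ≤ x ∧ x ≠ j) :
    pvGetCell (l.foldl (pvWriteA d bo) m) i j = pvGetCell m i j := by
  induction l generalizing m with
  | nil => rfl
  | cons x rest ih =>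
    rw [List.foldl_cons, ih _ (fun y hy => h y (List.mem_cons_of_mem _ hy))]
    have hx := h x List.mem_cons_self
    simp only [pvWriteA]
    rw [pvGetCell_set_ne_col _ _ _ _ _ _ hi0 hx.1 hj0 hx.2,
        pvGetCell_set_ne_col _ _ _ _ _ _ hi0 hx.1 hj0 hx.2]

lemma pv_foldlA_length (d : List (String × Int × Int)) (bo : List String)
    (l : List Int) (m : List (List Int)) :
    (l.foldl (pvWriteA d bo) m).length = m.length := by
  induction l generalizing m with
  | nil => rfl
  | cons x rest ih =>
    rw [List.foldl_cons, ih]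
    simp only [pvWriteA]
    rw [pvSetCell_length, pvSetCell_length]

lemma pv_foldlA_dims (d : List (String × Int × Int)) (bo : List String)
    (l : List Int) (m : List (List Int)) (B : Nat) (hd : ∀ row ∈ m, row.length = B) :
    ∀ row ∈ l.foldl (pvWriteA d bo) m, row.length = B := by
  induction l generalizing m with
  | nil => exact hd
  | cons x rest ih =>
    rw [List.foldl_cons]
    exact ih _ (pvSetCell_dims _ _ _ _ _ (pvSetCell_dims _ _ _ _ _ hd))

-- entry (i, tb.length + c) of A's full matrix, on a visible link column
lemma pvA_entry (tb : List String) (d : List (String × Int × Int)) (nodes branches : Int)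
    (hk : (d.map (fun p => p.1)).Nodup)
    (h3 : ∀ p ∈ (pvNonTree tb d).take (branches - tb.length).toNat,
        0 ≤ p.2.1 ∧ p.2.1 < nodes ∧ 0 ≤ p.2.2 ∧ p.2.2 < nodes)
    (hlen : branches ≤ tb.length + (pvNonTree tb d).length)
    (i c : Nat) (hi : (i : Int) < nodes - 1) (hc : (c : Int) < branches - tb.length) :
    pvGetCell (get_matrix_a tb d nodes branches) (i : Int) ((tb.length : Int) + (c : Int))
      = pvE (pvNonTree tb d) i c := by
  set L := pvNonTree tb d with hL
  set j : Int := (tb.length : Int) + (c : Int) with hj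
  have hj0 : 0 ≤ j := by rw [hj]; omega
  have hjb : j < branches := by rw [hj]; omega
  have hcL : c < L.length := by omega
  have hmemL : L[c]'hcL ∈ L.take (branches - tb.length).toNat := by
    have hlt : c < (L.take (branches - tb.length).toNat).length := by
      rw [List.length_take]; omega
    have he : (L.take (branches - tb.length).toNat)[c]'hlt = L[c]'hcL := List.getElem_take
    exact he ▸ List.getElem_mem hlt
  obtain ⟨hu0, hun, hv0, hvn⟩ := h3 _ hmemL
  unfold get_matrix_a
  simp only []
  set M0 : List (List Int) :=
    (PySem.List.pyRange 0 nodes 1).map (fun _ => (PySem.List.pyRange 0 branches 1).map (fun _ => (0 : Int))) with hM0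
  set bo := get_branches_order tb d with hbo
  rw [PySem.List.pyRange_one_append 0 j branches hj0 (le_of_lt hjb),
      PySem.List.pyRange_one_cons hjb, List.foldl_append, List.foldl_cons]
  set mpre := (PySem.List.pyRange 0 j 1).foldl (pvWriteA d bo) M0 with hmpre
  have hkey : PySem.List.pyGetD bo j "" = (L[c]'hcL).1 := by
    rw [hbo, pv_bo_eq, hj, show ((tb.length : Int) + (c : Int)) = ((tb.length + c : Nat) : Int) by push_cast; ring]
    rw [PySem.List.pyGetD_natCast, List.getD_eq_getElem?_getD,
        List.getElem?_append_right (by omega)]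
    simp only [Nat.add_sub_cancel_left]
    rw [List.getElem?_map, List.getElem?_eq_getElem hcL]
    rfl
  have hlook : pvLookup d ((L[c]'hcL).1) = some ((L[c]'hcL).2) :=
    pvLookup_of_mem d _ hk (List.mem_of_mem_filter (List.getElem_mem hcL))
  have hdimsM0 : ∀ row ∈ M0, row.length = branches.toNat := by
    intro row hrow
    rw [hM0] at hrow
    rcases List.mem_map.1 hrow with ⟨_, _, h⟩
    rw [← h, List.length_map, PySem.List.length_pyRange_one]
    omega
  have hdims : ∀ row ∈ mpre, row.length = branches.toNat := pv_foldlA_dims _ _ _ _ _ hdimsM0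
  have hlenpre : mpre.length = nodes.toNat := by
    rw [hmpre, pv_foldlA_length, hM0, List.length_map, PySem.List.length_pyRange_one]
    omega
  rw [pv_foldlA_getCell_ne _ _ _ _ _ _ (Int.natCast_nonneg i) hj0
      (by intro x hx; rcases (PySem.List.mem_pyRange_one).1 hx with ⟨h1, h2⟩; exact ⟨by omega, by omega⟩)]
  simp only [pvWriteA]
  rw [hkey, hlook]
  simp only [Option.getD_some]
  by_cases hiv : (i : Int) = (L[c]'hcL).2.2
  · rw [hiv]
    rw [pvGetCell_set_same _ _ _ _ branches.toNat
        (pvSetCell_dims _ _ _ _ _ hdims) hv0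
        (by rw [pvSetCell_length, hlenpre]; omega) hj0 (by omega)]
    simp only [pvE]
    rw [List.getElem?_eq_getElem hcL]
    simp [hiv]
  · rw [pvGetCell_set_ne_row _ _ _ _ _ _ hv0 (Int.natCast_nonneg i) (fun h => hiv h.symm)]
    by_cases hiu : (i : Int) = (L[c]'hcL).2.1
    · rw [hiu]
      rw [pvGetCell_set_same _ _ _ _ branches.toNat hdims hu0 (by rw [hlenpre]; omega) hj0 (by omega)]
      simp only [pvE]
      rw [List.getElem?_eq_getElem hcL]
      have huv : ¬ (L[c]'hcL).2.1 = (L[c]'hcL).2.2 := by rw [← hiu]; exact hiv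
      simp [hiu, huv]
    · rw [pvGetCell_set_ne_row _ _ _ _ _ _ hu0 (Int.natCast_nonneg i) (fun h => hiu h.symm)]
      rw [hmpre, pv_foldlA_getCell_ne _ _ _ _ _ _ (Int.natCast_nonneg i) hj0
          (by intro x hx; rcases (PySem.List.mem_pyRange_one).1 hx with ⟨h1, h2⟩; exact ⟨h1, by omega⟩)]
      rw [pvGetCell_all_zero _ _ _ ?_ (Int.natCast_nonneg i) hj0]
      · simp only [pvE]
        rw [List.getElem?_eq_getElem hcL]
        simp [hiv, hiu]
      · intro row hrow x hx
        rw [hM0] at hrow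
        rcases List.mem_map.1 hrow with ⟨_, _, h⟩
        rw [← h] at hx
        rcases List.mem_map.1 hx with ⟨_, _, hx⟩
        exact hx.symm

lemma pvA_link_eq (tb : List String) (d : List (String × Int × Int)) (nodes branches : Int)
    (hk : (d.map (fun p => p.1)).Nodup)
    (h3 : ∀ p ∈ (pvNonTree tb d).take (branches - tb.length).toNat,
        0 ≤ p.2.1 ∧ p.2.1 < nodes ∧ 0 ≤ p.2.2 ∧ p.2.2 < nodes)
    (hlen : branches ≤ tb.length + (pvNonTree tb d).length) :
    get_matrix_a_link tb d nodes branches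
      = (List.range (nodes - 1).toNat).map (fun i =>
          (List.range (branches - tb.length).toNat).map (fun c => pvE (pvNonTree tb d) i c)) := by
  unfold get_matrix_a_link
  simp only []
  rw [PySem.List.foldl_append_singleton_eq_map, List.nil_append]
  rw [PySem.List.pyRange_one 0 (nodes - 1), List.map_map]
  rw [show (nodes - 1 - 0).toNat = (nodes - 1).toNat by omega]
  apply List.map_congr_left
  intro i hi
  rw [List.mem_range] at hi
  simp only [Function.comp_apply]
  rw [PySem.List.foldl_append_singleton_eq_map, List.nil_append]
  rw [PySem.List.pyRange_one (tb.length : Int) branches, List.map_map]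
  apply List.map_congr_left
  intro c hc
  rw [List.mem_range] at hc
  simp only [Function.comp_apply]
  have hA := pvA_entry tb d nodes branches hk h3 hlen i c (by omega) (by omega)
  simp only [pvGetCell] at hA
  rw [show (0 : Int) + (i : Nat) = (i : Nat) by ring]
  exact hA

-- == B side ==

lemma pv_write2_length (nodes : Int) (m : List (List Int)) (uv : Int × Int) (col : Int) :
    (pvWrite2 nodes m uv col).length = m.length := by
  simp only [pvWrite2]
  split_ifs <;> simp [pvSetCell_length]

lemma pv_write2_dims (nodes : Int) (m : List (List Int)) (uv : Int × Int) (col : Int) (B : Nat)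
    (hd : ∀ row ∈ m, row.length = B) : ∀ row ∈ pvWrite2 nodes m uv col, row.length = B := by
  simp only [pvWrite2]
  split_ifs <;>
    first
    | exact pvSetCell_dims _ _ _ _ _ (pvSetCell_dims _ _ _ _ _ hd)
    | exact pvSetCell_dims _ _ _ _ _ hd
    | exact hd

lemma pv_write2_getCell_ne (nodes : Int) (m : List (List Int)) (uv : Int × Int)
    (col i j : Int) (hi0 : 0 ≤ i) (hcol0 : 0 ≤ col) (hj0 : 0 ≤ j) (hne : col ≠ j) :
    pvGetCell (pvWrite2 nodes m uv col) i j = pvGetCell m i j := by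
  simp only [pvWrite2]
  split_ifs <;>
    simp only [pvGetCell_set_ne_col _ _ _ _ _ _ hi0 hcol0 hj0 hne]

lemma pv_foldlB_getCell_ne (d : List (String × Int × Int)) (bo : List String)
    (nodes start : Int) (l : List Int) (m : List (List Int)) (i c : Int)
    (hi0 : 0 ≤ i) (hc0 : 0 ≤ c) (h : ∀ x ∈ l, start ≤ x ∧ x - start ≠ c) :
    pvGetCell (l.foldl (pvWriteB d bo nodes start) m) i c = pvGetCell m i c := by
  induction l generalizing m with
  | nil => rfl
  | cons x rest ih =>
    rw [List.foldl_cons, ih _ (fun y hy => h y (List.mem_cons_of_mem _ hy))]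
    have hx := h x List.mem_cons_self
    simp only [pvWriteB]
    exact pv_write2_getCell_ne _ _ _ _ _ _ hi0 (by omega) hc0 hx.2

lemma pv_foldlB_length (d : List (String × Int × Int)) (bo : List String)
    (nodes start : Int) (l : List Int) (m : List (List Int)) :
    (l.foldl (pvWriteB d bo nodes start) m).length = m.length := by
  induction l generalizing m with
  | nil => rfl
  | cons x rest ih =>
    rw [List.foldl_cons, ih]
    simp only [pvWriteB]
    rw [pv_write2_length]

lemma pv_foldlB_dims (d : List (String × Int × Int)) (bo : List String)
    (nodes start : Int) (l : List Int) (m : List (List Int)) (B : Nat)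
    (hd : ∀ row ∈ m, row.length = B) :
    ∀ row ∈ l.foldl (pvWriteB d bo nodes start) m, row.length = B := by
  induction l generalizing m with
  | nil => exact hd
  | cons x rest ih =>
    rw [List.foldl_cons]
    exact ih _ (by simp only [pvWriteB]; exact pv_write2_dims _ _ _ _ _ hd)

-- entry (i, c) of B's link block, on a visible link column
lemma pvB_entry (tb : List String) (d : List (String × Int × Int)) (nodes branches : Int)
    (hk : (d.map (fun p => p.1)).Nodup)
    (h3 : ∀ p ∈ (pvNonTree tb d).take (branches - tb.length).toNat,
        0 ≤ p.2.1 ∧ p.2.1 < nodes ∧ 0 ≤ p.2.2 ∧ p.2.2 < nodes)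
    (hlen : branches ≤ tb.length + (pvNonTree tb d).length)
    (i c : Nat) (hi : (i : Int) < nodes - 1) (hc : (c : Int) < branches - tb.length) :
    pvGetCell (get_matrix_a_link_alt tb d nodes branches) (i : Int) (c : Int)
      = pvE (pvNonTree tb d) i c := by
  set L := pvNonTree tb d with hL
  set j : Int := (tb.length : Int) + (c : Int) with hj
  have hjs : (tb.length : Int) ≤ j := by rw [hj]; omega
  have hjb : j < branches := by rw [hj]; omega
  have hcL : c < L.length := by omega
  have hmemL : L[c]'hcL ∈ L.take (branches - tb.length).toNat := by
    have hlt : c < (L.take (branches - tb.length).toNat).length := by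
      rw [List.length_take]; omega
    have he : (L.take (branches - tb.length).toNat)[c]'hlt = L[c]'hcL := List.getElem_take
    exact he ▸ List.getElem_mem hlt
  obtain ⟨hu0, hun, hv0, hvn⟩ := h3 _ hmemL
  unfold get_matrix_a_link_alt
  simp only []
  set bo := get_branches_order tb d with hbo
  set m0 : List (List Int) :=
    List.replicate (nodes - 1).toNat (List.replicate (branches - (tb.length : Int)).toNat (0 : Int)) with hm0
  rw [PySem.List.pyRange_one_append (tb.length : Int) j branches hjs (le_of_lt hjb),
      PySem.List.pyRange_one_cons hjb, List.foldl_append, List.foldl_cons]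
  set mpre := (PySem.List.pyRange (tb.length : Int) j 1).foldl
    (pvWriteB d bo nodes (tb.length : Int)) m0 with hmpre
  have hkey : PySem.List.pyGetD bo j "" = (L[c]'hcL).1 := by
    rw [hbo, pv_bo_eq, hj, show ((tb.length : Int) + (c : Int)) = ((tb.length + c : Nat) : Int) by push_cast; ring]
    rw [PySem.List.pyGetD_natCast, List.getD_eq_getElem?_getD,
        List.getElem?_append_right (by omega)]
    simp only [Nat.add_sub_cancel_left]
    rw [List.getElem?_map, List.getElem?_eq_getElem hcL]
    rfl
  have hlook : pvLookup d ((L[c]'hcL).1) = some ((L[c]'hcL).2) :=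
    pvLookup_of_mem d _ hk (List.mem_of_mem_filter (List.getElem_mem hcL))
  have hdimsM0 : ∀ row ∈ m0, row.length = (branches - (tb.length : Int)).toNat := by
    intro row hrow
    rw [hm0] at hrow
    rw [List.eq_of_mem_replicate hrow, List.length_replicate]
  have hdims : ∀ row ∈ mpre, row.length = (branches - (tb.length : Int)).toNat :=
    pv_foldlB_dims _ _ _ _ _ _ _ hdimsM0
  have hlenpre : mpre.length = (nodes - 1).toNat := by
    rw [hmpre, pv_foldlB_length, hm0, List.length_replicate]
  have hzero : pvGetCell m0 (i : Int) (c : Int) = 0 := by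
    apply pvGetCell_all_zero _ _ _ ?_ (Int.natCast_nonneg i) (Int.natCast_nonneg c)
    intro row hrow x hx
    rw [hm0] at hrow
    rw [List.eq_of_mem_replicate hrow] at hx
    exact List.eq_of_mem_replicate hx
  rw [pv_foldlB_getCell_ne _ _ _ _ _ _ _ _ (Int.natCast_nonneg i) (Int.natCast_nonneg c)
      (by intro x hx; rcases (PySem.List.mem_pyRange_one).1 hx with ⟨h1, h2⟩; exact ⟨by omega, by omega⟩)]
  simp only [pvWriteB]
  rw [hkey, hlook]
  simp only [Option.getD_some]
  rw [show j - (tb.length : Int) = (c : Int) by omega]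
  simp only [pvWrite2]
  by_cases hiv : (i : Int) = (L[c]'hcL).2.2
  · have hv2 : (L[c]'hcL).2.2 ≤ nodes - 2 := by omega
    rw [if_pos hv2, hiv]
    by_cases h1 : (L[c]'hcL).2.1 ≤ nodes - 2
    · rw [if_pos h1]
      rw [pvGetCell_set_same _ _ _ _ ((branches - (tb.length : Int)).toNat)
          (pvSetCell_dims _ _ _ _ _ hdims) hv0
          (by rw [pvSetCell_length, hlenpre]; omega) (Int.natCast_nonneg c) (by omega)]
      simp only [pvE]
      rw [List.getElem?_eq_getElem hcL]
      simp [hiv]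
    · rw [if_neg h1]
      rw [pvGetCell_set_same _ _ _ _ ((branches - (tb.length : Int)).toNat)
          hdims hv0 (by rw [hlenpre]; omega) (Int.natCast_nonneg c) (by omega)]
      simp only [pvE]
      rw [List.getElem?_eq_getElem hcL]
      simp [hiv]
  · have step1 : pvGetCell (if (L[c]'hcL).2.2 ≤ nodes - 2 then
        pvSetCell (if (L[c]'hcL).2.1 ≤ nodes - 2 then pvSetCell mpre (L[c]'hcL).2.1 (c : Int) 1 else mpre)
          (L[c]'hcL).2.2 (c : Int) (-1)
      else (if (L[c]'hcL).2.1 ≤ nodes - 2 then pvSetCell mpre (L[c]'hcL).2.1 (c : Int) 1 else mpre)) (i : Int) (c : Int)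
      = pvGetCell (if (L[c]'hcL).2.1 ≤ nodes - 2 then pvSetCell mpre (L[c]'hcL).2.1 (c : Int) 1 else mpre) (i : Int) (c : Int) := by
      by_cases hv2 : (L[c]'hcL).2.2 ≤ nodes - 2
      · rw [if_pos hv2]
        exact pvGetCell_set_ne_row _ _ _ _ _ _ hv0 (Int.natCast_nonneg i) (fun h => hiv h.symm)
      · rw [if_neg hv2]
    rw [step1]
    by_cases hiu : (i : Int) = (L[c]'hcL).2.1
    · have h1 : (L[c]'hcL).2.1 ≤ nodes - 2 := by omega
      rw [if_pos h1, hiu]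
      rw [pvGetCell_set_same _ _ _ _ ((branches - (tb.length : Int)).toNat)
          hdims hu0 (by rw [hlenpre]; omega) (Int.natCast_nonneg c) (by omega)]
      simp only [pvE]
      rw [List.getElem?_eq_getElem hcL]
      have huv : ¬ (L[c]'hcL).2.1 = (L[c]'hcL).2.2 := by rw [← hiu]; exact hiv
      simp [hiu, huv]
    · have step2 : pvGetCell (if (L[c]'hcL).2.1 ≤ nodes - 2 then
          pvSetCell mpre (L[c]'hcL).2.1 (c : Int) 1 else mpre) (i : Int) (c : Int)
          = pvGetCell mpre (i : Int) (c : Int) := by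
        by_cases h1 : (L[c]'hcL).2.1 ≤ nodes - 2
        · rw [if_pos h1]
          exact pvGetCell_set_ne_row _ _ _ _ _ _ hu0 (Int.natCast_nonneg i) (fun h => hiu h.symm)
        · rw [if_neg h1]
      rw [step2]
      rw [hmpre, pv_foldlB_getCell_ne _ _ _ _ _ _ _ _ (Int.natCast_nonneg i) (Int.natCast_nonneg c)
          (by intro x hx; rcases (PySem.List.mem_pyRange_one).1 hx with ⟨h1, h2⟩; exact ⟨h1, by omega⟩)]
      rw [hzero]
      simp only [pvE]
      rw [List.getElem?_eq_getElem hcL]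
      simp [hiv, hiu]

lemma pv_getCell_elem (m : List (List Int)) (i c : Nat) (hi : i < m.length)
    (hc : c < (m[i]'hi).length) :
    pvGetCell m (i : Int) (c : Int) = (m[i]'hi)[c]'hc := by
  unfold pvGetCell
  rw [pvGetD_elem m i [] hi, pvGetD_elem _ c 0 hc]

lemma pvB_eq (tb : List String) (d : List (String × Int × Int)) (nodes branches : Int)
    (hk : (d.map (fun p => p.1)).Nodup)
    (h3 : ∀ p ∈ (pvNonTree tb d).take (branches - tb.length).toNat,
        0 ≤ p.2.1 ∧ p.2.1 < nodes ∧ 0 ≤ p.2.2 ∧ p.2.2 < nodes)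
    (hlen : branches ≤ tb.length + (pvNonTree tb d).length) :
    get_matrix_a_link_alt tb d nodes branches
      = (List.range (nodes - 1).toNat).map (fun i =>
          (List.range (branches - tb.length).toNat).map (fun c => pvE (pvNonTree tb d) i c)) := by
  have hlenalt : (get_matrix_a_link_alt tb d nodes branches).length = (nodes - 1).toNat := by
    unfold get_matrix_a_link_alt
    simp only []
    rw [pv_foldlB_length, List.length_replicate]
  have hdimsalt : ∀ row ∈ get_matrix_a_link_alt tb d nodes branches,
      row.length = (branches - (tb.length : Int)).toNat := by
    unfold get_matrix_a_link_alt
    simp only []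
    apply pv_foldlB_dims
    intro row hrow
    rw [List.eq_of_mem_replicate hrow, List.length_replicate]
  apply List.ext_getElem
  · rw [hlenalt, List.length_map, List.length_range]
  intro i hi1 hi2
  have hiR : i < (nodes - 1).toNat := by rw [hlenalt] at hi1; exact hi1
  apply List.ext_getElem
  · simp [hdimsalt _ (List.getElem_mem hi1)]
  intro c hc1 hc2
  have hcw : c < (branches - (tb.length : Int)).toNat := by
    rw [hdimsalt _ (List.getElem_mem hi1)] at hc1; exact hc1
  simp only [List.getElem_map, List.getElem_range]
  rw [← pv_getCell_elem _ i c hi1 hc1]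
  exact pvB_entry tb d nodes branches hk h3 hlen i c (by omega) (by omega)

-- with branches <= 0 both programs return (nodes-1) empty rows whatever the rest of the input is
lemma pv_trivial (tb : List String) (d : List (String × Int × Int)) (nodes branches : Int)
    (hb : branches ≤ 0) :
    get_matrix_a_link tb d nodes branches = get_matrix_a_link_alt tb d nodes branches := by
  unfold get_matrix_a_link get_matrix_a_link_alt
  simp only []
  rw [PySem.List.pyRange_one_eq_nil (show branches ≤ (tb.length : Int) by omega), List.foldl_nil]
  rw [PySem.List.foldl_append_singleton_eq_map, List.nil_append]
  simp only [List.foldl_nil]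
  rw [List.map_const', PySem.List.length_pyRange_one]
  rw [show (branches - (tb.length : Int)).toNat = 0 by omega]
  rw [show (nodes - 1 - 0).toNat = (nodes - 1).toNat by omega]
  simp

-- ===== VERDICT (by name: the statement is the Claim_ definition above) =====
theorem get_matrix_a_link_spec : Claim_equal_get_matrix_a_link := by
  intro tb d nodes branches _hdom hpre
  unfold Spec_get_matrix_a_link
  rcases hpre with hb | ⟨hk, _h2, h3, hlen⟩
  · exact pv_trivial tb d nodes branches hb
  · rw [pvA_link_eq tb d nodes branches hk h3 hlen, pvB_eq tb d nodes branches hk h3 hlen]
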